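-- pv_equiv track=rewrite | github.com/peteskylight/ACTION_CODING_ENGINE | utils/video_players.py | merge_action_dicts
-- ===== SOURCE A (Python) =====
-- def merge_action_dicts(action_dict_front, action_dict_center):
--     merged = {}
--
--     all_track_ids = set(action_dict_front) | set(action_dict_center)
--
--     for track_id in all_track_ids:
--         action_front = action_dict_front.get(track_id)
--         action_center = action_dict_center.get(track_id)
--
--         if action_center and action_center != "None":
--             merged[track_id] = action_center
--         elif action_front and action_front != "None":
--             merged[track_id] = action_front
--         else:
--             merged[track_id] = "None"
--
--     return merged
-- ===== SOURCE B (Python) =====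
-- def merge_action_dicts(action_dict_front, action_dict_center):
--     merged = {}
--     for track_id, action in action_dict_front.items():
--         merged[track_id] = action if (action and action != "None") else "None"
--     for track_id, action in action_dict_center.items():
--         if action and action != "None":
--             merged[track_id] = action
--         elif track_id not in merged:
--             merged[track_id] = "None"
--     return merged
-- ===== Notes on version B (the rewrite author's own statement) =====
-- stated objective: simpler
-- what changed: Replaces the union-set construction plus per-key double .get() lookup with two direct passes over the items of each dict (front first, then center overriding), so the union set and the per-key lookups disappear.
import Mathlib
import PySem

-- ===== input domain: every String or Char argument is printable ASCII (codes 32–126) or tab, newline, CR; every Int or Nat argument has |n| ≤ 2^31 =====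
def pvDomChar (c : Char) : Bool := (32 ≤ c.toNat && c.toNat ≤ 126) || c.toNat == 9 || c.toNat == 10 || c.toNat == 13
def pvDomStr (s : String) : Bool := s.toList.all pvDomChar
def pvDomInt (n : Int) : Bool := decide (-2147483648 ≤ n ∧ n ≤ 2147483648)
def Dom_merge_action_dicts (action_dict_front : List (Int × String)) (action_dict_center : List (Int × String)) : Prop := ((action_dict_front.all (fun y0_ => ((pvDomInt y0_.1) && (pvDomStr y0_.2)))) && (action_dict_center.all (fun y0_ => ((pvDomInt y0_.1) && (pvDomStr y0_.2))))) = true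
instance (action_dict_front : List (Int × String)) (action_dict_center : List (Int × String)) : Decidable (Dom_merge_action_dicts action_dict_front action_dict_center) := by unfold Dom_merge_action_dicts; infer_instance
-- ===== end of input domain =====

-- B replaces A's union-set construction + per-key double .get() lookup with two direct passes
-- over the items of each dict (front first, then center overriding) — same result, simpler
-- decomposition.  A iterates over a Python set (hash order, not modelled); its port uses the
-- set's list order, the order in which dict outputs are compared being immaterial.

-- ===== PORT A =====
-- Python truthiness of `x and x != "None"` for x : Optional[str] (None and "" are falsy).
def pvTruthyNotNone (o : Option String) : Bool :=
  match o with
  | some s => !(s == "") && !(s == "None")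
  | none => false

def merge_action_dicts (action_dict_front : List (Int × String)) (action_dict_center : List (Int × String)) : List (Int × String) :=
  let fd : PySem.Dict Int String := PySem.Dict.ofList action_dict_front
  let cd : PySem.Dict Int String := PySem.Dict.ofList action_dict_center
  -- all_track_ids = set(action_dict_front) | set(action_dict_center)
  let all_track_ids : PySem.Set Int := PySem.Set.union (PySem.Set.ofList fd.keys) (PySem.Set.ofList cd.keys)
  let merged := all_track_ids.foldl (fun merged track_id =>
    let action_front := fd.get? track_id
    let action_center := cd.get? track_id
    if pvTruthyNotNone action_center then
      merged.insert track_id (action_center.getD "")  -- getD "": in this branch action_center is `some`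
    else if pvTruthyNotNone action_front then
      merged.insert track_id (action_front.getD "")   -- likewise `some` here
    else
      merged.insert track_id "None") PySem.Dict.empty
  merged.items

-- ===== PORT B =====
def merge_action_dicts_alt (action_dict_front : List (Int × String)) (action_dict_center : List (Int × String)) : List (Int × String) :=
  let fd : PySem.Dict Int String := PySem.Dict.ofList action_dict_front
  let cd : PySem.Dict Int String := PySem.Dict.ofList action_dict_center
  let merged := fd.items.foldl (fun merged p =>
    merged.insert p.1 (if !(p.2 == "") && !(p.2 == "None") then p.2 else "None")) PySem.Dict.empty
  let merged2 := cd.items.foldl (fun merged p =>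
    if !(p.2 == "") && !(p.2 == "None") then merged.insert p.1 p.2
    else if merged.contains p.1 then merged
    else merged.insert p.1 "None") merged
  merged2.items

-- ===== PRECONDITION & SPEC =====
def Spec_merge_action_dicts (action_dict_front : List (Int × String)) (action_dict_center : List (Int × String)) (out : List (Int × String)) : Prop := out = merge_action_dicts_alt action_dict_front action_dict_center
instance (action_dict_front : List (Int × String)) (action_dict_center : List (Int × String)) (out : List (Int × String)) : Decidable (Spec_merge_action_dicts action_dict_front action_dict_center out) := by unfold Spec_merge_action_dicts; infer_instance

-- ===== CLAIM (what is proved, stated in full; the proofs are below) =====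
def Claim_equal_merge_action_dicts : Prop := ∀ (action_dict_front : List (Int × String)) (action_dict_center : List (Int × String)), Dom_merge_action_dicts action_dict_front action_dict_center → Spec_merge_action_dicts action_dict_front action_dict_center (merge_action_dicts action_dict_front action_dict_center)

-- ===== LEMMAS AND PROOFS =====

-- The merged value at key t, as decided by A's priority rule.
def pvRes (fd cd : PySem.Dict Int String) (t : Int) : String :=
  if pvTruthyNotNone (cd.get? t) then (cd.get? t).getD ""
  else if pvTruthyNotNone (fd.get? t) then (fd.get? t).getD ""
  else "None"

-- folding Set.add over a Nodup list appends exactly the fresh elements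
lemma foldl_set_add (t : List Int) : ∀ (s : List Int), t.Nodup →
    t.foldl PySem.Set.add s = s ++ t.filter (fun x => !(s.contains x)) := by
  induction t with
  | nil => intro s _; simp
  | cons x t ih =>
    intro s hnd
    rw [List.nodup_cons] at hnd
    simp only [List.foldl_cons, List.filter_cons]
    rw [ih _ hnd.2]
    unfold PySem.Set.add
    by_cases hx : x ∈ s
    · simp [PySem.Set.contains, hx]
    · simp only [PySem.Set.contains, List.contains_iff_mem] at *
      simp [hx, List.append_assoc]
      apply List.filter_congr
      intro y hy
      have hne : y ≠ x := fun h => hnd.1 (h ▸ hy)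
      simp [hne]

-- B's second pass: the keys it ends with and the value it leaves at every key
lemma pass2_spec (l : List (Int × String)) : ∀ (m0 : PySem.Dict Int String),
    (l.map Prod.fst).Nodup → m0.keys.Nodup →
    (l.foldl (fun merged p =>
        if !(p.2 == "") && !(p.2 == "None") then merged.insert p.1 p.2
        else if merged.contains p.1 then merged
        else merged.insert p.1 "None") m0).keys
      = m0.keys ++ (l.map Prod.fst).filter (fun x => !(m0.contains x))
    ∧ ∀ t, (l.foldl (fun merged p =>
        if !(p.2 == "") && !(p.2 == "None") then merged.insert p.1 p.2
        else if merged.contains p.1 then merged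
        else merged.insert p.1 "None") m0).getD t ""
      = (match l.find? (fun p => p.1 == t) with
        | some p => if !(p.2 == "") && !(p.2 == "None") then p.2
                    else if m0.contains t then m0.getD t "" else "None"
        | none => m0.getD t "") := by
  induction l with
  | nil => intro m0 _ _; simp
  | cons p l ih =>
    intro m0 hl hm
    rw [List.map_cons, List.nodup_cons] at hl
    obtain ⟨hp, hl⟩ := hl
    simp only [List.foldl_cons, List.map_cons, List.filter_cons, List.find?_cons]
    by_cases hv : (!(p.2 == "") && !(p.2 == "None")) = true
    · -- truthy: insert p.1 p.2
      rw [if_pos hv]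
      obtain ⟨ihk, ihg⟩ := ih (m0.insert p.1 p.2) hl (PySem.Dict.nodup_keys_insert _ _ _ hm)
      constructor
      · rw [ihk]
        by_cases hc : m0.contains p.1
        · rw [PySem.Dict.keys_insert_of_contains _ _ hc]
          simp only [hc, Bool.not_true]
          rw [if_neg (by simp)]
          congr 1
          apply List.filter_congr
          intro y hy
          have hne : y ≠ p.1 := fun h => hp (h ▸ hy)
          simp [PySem.Dict.contains_insert, hne]
        · simp only [Bool.not_eq_true] at hc
          rw [PySem.Dict.keys_insert_of_not_contains _ _ hc]
          simp only [hc, Bool.not_false, List.append_assoc, List.singleton_append]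
          congr 2
          apply List.filter_congr
          intro y hy
          have hne : y ≠ p.1 := fun h => hp (h ▸ hy)
          simp [PySem.Dict.contains_insert, hne]
      · intro t
        rw [ihg t]
        by_cases ht : p.1 = t
        · subst ht
          have : l.find? (fun q => q.1 == p.1) = none := by
            rw [List.find?_eq_none]
            intro q hq
            simp only [beq_iff_eq]
            exact fun h => hp (h ▸ (List.mem_map_of_mem hq))
          simp [this, hv]
        · have hbe : (p.1 == t) = false := by simp [ht]
          simp only [hbe]
          cases hf : l.find? (fun q => q.1 == t) with
          | none =>
            rw [PySem.Dict.getD_insert]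
            simp [Ne.symm ht]
          | some q =>
            have hct : (m0.insert p.1 p.2).contains t = m0.contains t := by
              rw [PySem.Dict.contains_insert]
              simp [Ne.symm ht]
            rw [hct, PySem.Dict.getD_insert]
            simp [Ne.symm ht]
    · rw [if_neg (by simp [hv])]
      by_cases hc : m0.contains p.1
      · -- contained: no-op
        rw [if_pos hc]
        obtain ⟨ihk, ihg⟩ := ih m0 hl hm
        constructor
        · rw [ihk]
          simp [hc]
        · intro t
          rw [ihg t]
          by_cases ht : p.1 = t
          · subst ht
            have : l.find? (fun q => q.1 == p.1) = none := by
              rw [List.find?_eq_none]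
              intro q hq
              simp only [beq_iff_eq]
              exact fun h => hp (h ▸ (List.mem_map_of_mem hq))
            simp [this, hv, hc]
          · have hbe : (p.1 == t) = false := by simp [ht]
            simp only [hbe]
      · -- fresh falsy: insert "None"
        rw [if_neg (by simp [hc])]
        simp only [Bool.not_eq_true] at hc
        obtain ⟨ihk, ihg⟩ := ih (m0.insert p.1 "None") hl (PySem.Dict.nodup_keys_insert _ _ _ hm)
        constructor
        · rw [ihk, PySem.Dict.keys_insert_of_not_contains _ _ hc]
          simp only [hc, Bool.not_false, List.append_assoc, List.singleton_append]
          congr 2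
          apply List.filter_congr
          intro y hy
          have hne : y ≠ p.1 := fun h => hp (h ▸ hy)
          simp [PySem.Dict.contains_insert, hne]
        · intro t
          rw [ihg t]
          by_cases ht : p.1 = t
          · subst ht
            have : l.find? (fun q => q.1 == p.1) = none := by
              rw [List.find?_eq_none]
              intro q hq
              simp only [beq_iff_eq]
              exact fun h => hp (h ▸ (List.mem_map_of_mem hq))
            simp [this, hv, hc]
          · have hbe : (p.1 == t) = false := by simp [ht]
            simp only [hbe]
            have hct : (m0.insert p.1 "None").contains t = m0.contains t := by
              rw [PySem.Dict.contains_insert]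
              simp [Ne.symm ht]
            cases hf : l.find? (fun q => q.1 == t) with
            | none =>
              rw [PySem.Dict.getD_insert]
              simp [Ne.symm ht]
            | some q =>
              rw [hct, PySem.Dict.getD_insert]
              simp [Ne.symm ht]

-- B's first pass just normalises every front item in place
lemma pass1_spec (f : List (Int × String)) :
    ((PySem.Dict.ofList f).items.foldl (fun merged p =>
      merged.insert p.1 (if !(p.2 == "") && !(p.2 == "None") then p.2 else "None")) PySem.Dict.empty).items
    = (PySem.Dict.ofList f).items.map (fun p => (p.1, if !(p.2 == "") && !(p.2 == "None") then p.2 else "None")) := by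
  rw [PySem.Dict.items_foldl_insert_fresh (PySem.Dict.ofList f).items Prod.fst
      (fun p => if !(p.2 == "") && !(p.2 == "None") then p.2 else "None") PySem.Dict.empty
      (fun a _ => PySem.Dict.contains_empty _) (PySem.Dict.nodup_keys_ofList f)]
  simp [PySem.Dict.empty]

lemma m1_keys (f : List (Int × String)) :
    ((PySem.Dict.ofList f).items.foldl (fun merged p =>
      merged.insert p.1 (if !(p.2 == "") && !(p.2 == "None") then p.2 else "None")) PySem.Dict.empty).keys
    = (PySem.Dict.ofList f).keys := by
  simp only [PySem.Dict.keys, pass1_spec, List.map_map]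
  rfl

lemma m1_contains (f : List (Int × String)) (t : Int) :
    ((PySem.Dict.ofList f).items.foldl (fun merged p =>
      merged.insert p.1 (if !(p.2 == "") && !(p.2 == "None") then p.2 else "None")) PySem.Dict.empty).contains t
    = (PySem.Dict.ofList f).contains t := by
  simp only [PySem.Dict.contains, pass1_spec, List.any_map]
  rfl

lemma m1_getD_some (f : List (Int × String)) (t : Int) (s : String)
    (h : (PySem.Dict.ofList f).get? t = some s) :
    ((PySem.Dict.ofList f).items.foldl (fun merged p =>
      merged.insert p.1 (if !(p.2 == "") && !(p.2 == "None") then p.2 else "None")) PySem.Dict.empty).getD t ""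
    = (if !(s == "") && !(s == "None") then s else "None") := by
  have hmem : (t, s) ∈ (PySem.Dict.ofList f).items := PySem.Dict.mem_items_of_get?_eq_some _ h
  have hmem2 : (t, (if !(s == "") && !(s == "None") then s else "None")) ∈
      ((PySem.Dict.ofList f).items.foldl (fun merged p =>
        merged.insert p.1 (if !(p.2 == "") && !(p.2 == "None") then p.2 else "None")) PySem.Dict.empty).items := by
    rw [pass1_spec]
    exact List.mem_map_of_mem hmem
  exact PySem.Dict.getD_of_mem_items _ hmem2 (by rw [m1_keys]; exact PySem.Dict.nodup_keys_ofList f) ""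

-- ===== VERDICT (by name: the statement is the Claim_ definition above) =====
theorem merge_action_dicts_spec : Claim_equal_merge_action_dicts := by
  intro f c _
  unfold Spec_merge_action_dicts merge_action_dicts merge_action_dicts_alt
  dsimp only
  have hfk : (PySem.Dict.ofList f).keys.Nodup := PySem.Dict.nodup_keys_ofList f
  have hck : (PySem.Dict.ofList c).keys.Nodup := PySem.Dict.nodup_keys_ofList c
  -- A's fold body always inserts pvRes
  have hfun : (fun (merged : PySem.Dict Int String) track_id =>
      let action_front := (PySem.Dict.ofList f : PySem.Dict Int String).get? track_id
      let action_center := (PySem.Dict.ofList c : PySem.Dict Int String).get? track_id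
      if pvTruthyNotNone action_center then merged.insert track_id (action_center.getD "")
      else if pvTruthyNotNone action_front then merged.insert track_id (action_front.getD "")
      else merged.insert track_id "None")
      = (fun (merged : PySem.Dict Int String) t =>
          merged.insert t (pvRes (PySem.Dict.ofList f) (PySem.Dict.ofList c) t)) := by
    funext merged t
    unfold pvRes
    dsimp only
    split_ifs <;> rfl
  -- the union set, as a plain list
  have hofl : ∀ (ks : List Int), ks.Nodup → PySem.Set.ofList ks = ks := by
    intro ks hnd
    show List.foldl PySem.Set.add [] ks = ks
    rw [foldl_set_add ks [] hnd]
    simp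
  have hall : PySem.Set.union (PySem.Set.ofList (PySem.Dict.ofList f : PySem.Dict Int String).keys)
        (PySem.Set.ofList (PySem.Dict.ofList c : PySem.Dict Int String).keys)
      = (PySem.Dict.ofList f : PySem.Dict Int String).keys
        ++ (PySem.Dict.ofList c : PySem.Dict Int String).keys.filter
             (fun x => !((PySem.Dict.ofList f : PySem.Dict Int String).keys.contains x)) := by
    show PySem.Set.update _ _ = _
    unfold PySem.Set.update
    rw [hofl _ hfk, hofl _ hck, foldl_set_add _ _ hck]
  have hallnd : ((PySem.Dict.ofList f : PySem.Dict Int String).keys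
        ++ (PySem.Dict.ofList c : PySem.Dict Int String).keys.filter
             (fun x => !((PySem.Dict.ofList f : PySem.Dict Int String).keys.contains x))).Nodup := by
    refine List.Nodup.append hfk (hck.filter _) ?_
    intro x hx1 hx2
    have h3 : x ∉ (PySem.Dict.ofList f : PySem.Dict Int String).keys := by
      simpa using List.of_mem_filter hx2
    exact h3 hx1
  -- A's items
  rw [hfun, hall]
  rw [PySem.Dict.items_foldl_insert_fresh _ (fun t => t)
      (pvRes (PySem.Dict.ofList f) (PySem.Dict.ofList c)) PySem.Dict.empty
      (fun a _ => PySem.Dict.contains_empty _) (by simpa using hallnd)]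
  -- B's second pass
  have hckl : ((PySem.Dict.ofList c : PySem.Dict Int String).items.map Prod.fst).Nodup := hck
  have hm1nd : ((PySem.Dict.ofList f : PySem.Dict Int String).items.foldl (fun merged p =>
      merged.insert p.1 (if !(p.2 == "") && !(p.2 == "None") then p.2 else "None")) PySem.Dict.empty).keys.Nodup := by
    rw [m1_keys]; exact hfk
  obtain ⟨hk2, hg2⟩ := pass2_spec (PySem.Dict.ofList c : PySem.Dict Int String).items
    ((PySem.Dict.ofList f : PySem.Dict Int String).items.foldl (fun merged p =>
      merged.insert p.1 (if !(p.2 == "") && !(p.2 == "None") then p.2 else "None")) PySem.Dict.empty)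
    hckl hm1nd
  have hKeq : ((PySem.Dict.ofList c : PySem.Dict Int String).items.foldl (fun merged p =>
        if !(p.2 == "") && !(p.2 == "None") then merged.insert p.1 p.2
        else if merged.contains p.1 then merged
        else merged.insert p.1 "None")
        ((PySem.Dict.ofList f : PySem.Dict Int String).items.foldl (fun merged p =>
          merged.insert p.1 (if !(p.2 == "") && !(p.2 == "None") then p.2 else "None")) PySem.Dict.empty)).keys
      = (PySem.Dict.ofList f : PySem.Dict Int String).keys
        ++ (PySem.Dict.ofList c : PySem.Dict Int String).keys.filter
             (fun x => !((PySem.Dict.ofList f : PySem.Dict Int String).keys.contains x)) := by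
    rw [hk2, m1_keys]
    congr 1
    apply List.filter_congr
    intro y _
    rw [m1_contains f y]
    by_cases h : y ∈ (PySem.Dict.ofList f : PySem.Dict Int String).keys
    · rw [(PySem.Dict.contains_iff_mem_keys (PySem.Dict.ofList f) y).2 h]
      simp [h]
    · have h1 : (PySem.Dict.ofList f : PySem.Dict Int String).contains y = false := by
        rw [← Bool.not_eq_true, PySem.Dict.contains_iff_mem_keys]; exact h
      rw [h1]
      simp [h]
  have hMnd := hKeq ▸ hallnd
  rw [PySem.Dict.items_eq_map_keys _ hMnd "", hKeq]
  -- two maps over the same key list; compare pointwise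
  apply List.map_congr_left
  intro t htmem
  refine Prod.ext rfl ?_
  show pvRes (PySem.Dict.ofList f) (PySem.Dict.ofList c) t = _
  rw [hg2 t]
  have hget : (PySem.Dict.ofList c : PySem.Dict Int String).get? t
      = ((PySem.Dict.ofList c : PySem.Dict Int String).items.find? (fun p => p.1 == t)).map (fun p => p.2) := rfl
  cases hf : (PySem.Dict.ofList c : PySem.Dict Int String).items.find? (fun p => p.1 == t) with
  | some q =>
    have hcq : (PySem.Dict.ofList c : PySem.Dict Int String).get? t = some q.2 := by rw [hget, hf]; rfl
    unfold pvRes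
    rw [hcq, m1_contains f t]
    by_cases hq : (!(q.2 == "") && !(q.2 == "None")) = true
    · simp [pvTruthyNotNone, hq]
    · cases hfd : (PySem.Dict.ofList f : PySem.Dict Int String).get? t with
      | some s =>
        have hcf : (PySem.Dict.ofList f : PySem.Dict Int String).contains t = true := by
          rw [PySem.Dict.contains_eq_isSome_get?, hfd]; rfl
        rw [m1_getD_some f t s hfd]
        simp [pvTruthyNotNone, hq, hcf]
      | none =>
        have hcf : (PySem.Dict.ofList f : PySem.Dict Int String).contains t = false := by
          rw [PySem.Dict.contains_eq_isSome_get?, hfd]; rfl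
        simp [pvTruthyNotNone, hq, hcf]
  | none =>
    have hcq : (PySem.Dict.ofList c : PySem.Dict Int String).get? t = none := by rw [hget, hf]; rfl
    unfold pvRes
    rw [hcq]
    cases hfd : (PySem.Dict.ofList f : PySem.Dict Int String).get? t with
    | some s =>
      rw [m1_getD_some f t s hfd]
      simp [pvTruthyNotNone]
    | none =>
      -- impossible: t is in neither dict but in the merged key list
      exfalso
      have hnf : t ∉ (PySem.Dict.ofList f : PySem.Dict Int String).keys :=
        (PySem.Dict.get?_eq_none_iff_not_mem_keys (PySem.Dict.ofList f) t).1 hfd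
      have hnc : t ∉ (PySem.Dict.ofList c : PySem.Dict Int String).keys := by
        intro hmem
        obtain ⟨p, hpmem, hpt⟩ := List.mem_map.1 hmem
        have := List.find?_eq_none.1 hf p hpmem
        simp [hpt] at this
      rcases List.mem_append.1 htmem with h | h
      · exact hnf h
      · exact hnc (List.mem_of_mem_filter h)
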